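-- pv_equiv track=rewrite | github.com/data-storage-lab/ConfD | ConfD-plugins/Plugin#1:ConfD-specCk/main.py | checkIndexes
-- ===== SOURCE A (Python) =====
-- def checkIndexes(indexes, stringsplit, feature):
--     dependencyFound = False
--     for index in indexes:
--         min = index - 5
--         max = index + 5
--         if min < 0:
--             min = 0
--         if max > len(stringsplit):
--             max = len(stringsplit)
--         for i in range(min, max):
--             if feature in stringsplit[i]:
--                 dependencyFound = True
--                 break
--     return dependencyFound
-- ===== SOURCE B (Python) =====
-- def checkIndexes(indexes, stringsplit, feature):
--     idxset = set(indexes)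
--     for i, chunk in enumerate(stringsplit):
--         if feature in chunk and any(j in idxset for j in range(i - 4, i + 6)):
--             return True
--     return False
-- ===== Notes on version B (the rewrite author's own statement) =====
-- stated objective: alternative
-- what changed: Traversal is inverted: instead of looping over indexes and scanning a clamped window of positions for each, B scans the string chunks once, and for each chunk containing the feature checks proximity to any index via a set built once; it also returns early on the first hit.
import Mathlib
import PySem

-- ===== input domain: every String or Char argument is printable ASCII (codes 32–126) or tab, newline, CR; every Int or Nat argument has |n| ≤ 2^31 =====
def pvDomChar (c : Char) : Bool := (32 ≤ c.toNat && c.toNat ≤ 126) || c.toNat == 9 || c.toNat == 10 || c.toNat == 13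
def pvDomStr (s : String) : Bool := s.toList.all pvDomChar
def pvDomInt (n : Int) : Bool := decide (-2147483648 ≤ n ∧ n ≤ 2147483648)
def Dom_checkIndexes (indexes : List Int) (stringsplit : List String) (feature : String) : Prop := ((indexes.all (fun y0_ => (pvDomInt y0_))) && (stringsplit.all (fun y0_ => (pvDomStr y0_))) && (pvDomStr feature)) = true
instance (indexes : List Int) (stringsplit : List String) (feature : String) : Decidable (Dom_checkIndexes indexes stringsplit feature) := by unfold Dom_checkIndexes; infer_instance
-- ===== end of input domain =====

-- B inverts the traversal: one pass over the chunks, testing index proximity against a set; same result, no speed claim.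

-- ===== PORT A =====
-- inner 'for i in range(min, max): if feature in stringsplit[i]: dependencyFound = True; break'
def checkIndexesInner (stringsplit : List String) (feature : String) (rng : List Int) (dependencyFound : Bool) : Bool :=
  match rng with
  | [] => dependencyFound
  | i :: rest =>
    if PySem.Str.isIn feature (PySem.List.pyGetD stringsplit i "") then true
    else checkIndexesInner stringsplit feature rest dependencyFound

def checkIndexes (indexes : List Int) (stringsplit : List String) (feature : String) : Bool :=
  indexes.foldl (fun dependencyFound index =>
    let min0 := index - 5
    let max0 := index + 5
    let min1 := if min0 < 0 then (0 : Int) else min0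
    let max1 := if max0 > (PySem.List.len stringsplit) then (PySem.List.len stringsplit) else max0
    checkIndexesInner stringsplit feature (PySem.List.pyRange min1 max1 1) dependencyFound) false

-- ===== PORT B =====
def checkIndexes_alt (indexes : List Int) (stringsplit : List String) (feature : String) : Bool :=
  let idxset := PySem.Set.ofList indexes
  (PySem.List.enumerate stringsplit 0).any (fun p =>
    PySem.Str.isIn feature p.2 &&
    (PySem.List.pyRange (p.1 - 4) (p.1 + 6) 1).any (fun j => PySem.Set.contains idxset j))

-- ===== PRECONDITION & SPEC =====
def Spec_checkIndexes (indexes : List Int) (stringsplit : List String) (feature : String) (out : Bool) : Prop := out = checkIndexes_alt indexes stringsplit feature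
instance (indexes : List Int) (stringsplit : List String) (feature : String) (out : Bool) : Decidable (Spec_checkIndexes indexes stringsplit feature out) := by unfold Spec_checkIndexes; infer_instance

-- ===== CLAIM (what is proved, stated in full; the proofs are below) =====
def Claim_equal_checkIndexes : Prop := ∀ (indexes : List Int) (stringsplit : List String) (feature : String), Dom_checkIndexes indexes stringsplit feature → Spec_checkIndexes indexes stringsplit feature (checkIndexes indexes stringsplit feature)

-- ===== LEMMAS AND PROOFS =====

-- the inner loop of A is an 'or' of acc with an any over the range
theorem checkIndexesInner_eq (stringsplit : List String) (feature : String) (rng : List Int) (acc : Bool) :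
    checkIndexesInner stringsplit feature rng acc
      = (acc || rng.any (fun i => PySem.Str.isIn feature (PySem.List.pyGetD stringsplit i ""))) := by
  induction rng with
  | nil => simp [checkIndexesInner]
  | cons i rest ih =>
    simp only [checkIndexesInner]
    by_cases h : PySem.Str.isIn feature (PySem.List.pyGetD stringsplit i "") = true <;>
      simp [*, Bool.or_left_comm]

theorem foldl_eq_or_any {α : Type} (f : Bool → α → Bool) (g : α → Bool)
    (hfg : ∀ a x, f a x = (a || g x)) (l : List α) (acc : Bool) :
    l.foldl f acc = (acc || l.any g) := by
  induction l generalizing acc with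
  | nil => simp
  | cons x xs ih => rw [List.foldl_cons, hfg, ih, List.any_cons, Bool.or_assoc]

-- A as a single 'any' over indexes
theorem checkIndexes_eq_any (indexes : List Int) (stringsplit : List String) (feature : String) :
    checkIndexes indexes stringsplit feature
      = indexes.any (fun index =>
          (PySem.List.pyRange
              (if index - 5 < 0 then (0 : Int) else index - 5)
              (if index + 5 > (PySem.List.len stringsplit) then (PySem.List.len stringsplit) else index + 5)
              1).any (fun i => PySem.Str.isIn feature (PySem.List.pyGetD stringsplit i ""))) := by
  unfold checkIndexes
  exact (foldl_eq_or_any _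
    (fun index =>
      (PySem.List.pyRange
          (if index - 5 < 0 then (0 : Int) else index - 5)
          (if index + 5 > (PySem.List.len stringsplit) then (PySem.List.len stringsplit) else index + 5)
          1).any (fun i => PySem.Str.isIn feature (PySem.List.pyGetD stringsplit i "")))
    (fun a x => checkIndexesInner_eq _ _ _ _) indexes false).trans (Bool.false_or _)

-- ===== VERDICT (by name: the statement is the Claim_ definition above) =====
theorem checkIndexes_spec : Claim_equal_checkIndexes := by
  intro indexes stringsplit feature _
  unfold Spec_checkIndexes checkIndexes_alt
  rw [checkIndexes_eq_any, Bool.eq_iff_iff]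
  simp only [List.any_eq_true, PySem.List.mem_pyRange_one, PySem.List.mem_enumerate_iff,
    PySem.Set.contains_iff, PySem.Set.mem_ofList, Bool.and_eq_true]
  constructor
  · rintro ⟨index, hidx, i, ⟨h1, h2⟩, hin⟩
    have h0 : 0 ≤ i := by split_ifs at h1 <;> omega
    have hlt : i < (PySem.List.len stringsplit) := by split_ifs at h2 <;> simp [PySem.List.len_eq] at * <;> omega
    obtain ⟨k, hk, rfl⟩ : ∃ k : Nat, k < stringsplit.length ∧ i = (k : Int) := by
      refine ⟨i.toNat, ?_, (Int.toNat_of_nonneg h0).symm⟩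
      simp [PySem.List.len_eq] at hlt; omega
    refine ⟨((k : Int), stringsplit[k]), ⟨k, hk, by simp⟩, ?_, index, ?_, hidx⟩
    · simpa [PySem.List.pyGetD_natCast, List.getD_eq_getElem?_getD, hk] using hin
    · constructor <;> [skip; skip] <;> simp only [] <;> omega
  · rintro ⟨⟨i, s⟩, hmem, hin, index, ⟨h1, h2⟩, hidx⟩
    obtain ⟨k, hk, hpk⟩ := hmem
    obtain ⟨rfl, rfl⟩ : i = (k : Int) ∧ s = stringsplit[k] := by
      have := hpk; simp at this; exact ⟨by simp [this.1], this.2⟩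
    refine ⟨index, hidx, (k : Int), ⟨?_, ?_⟩, ?_⟩
    · split_ifs <;> simp only [] at h1 h2 ⊢ <;> omega
    · split_ifs with h <;> simp [PySem.List.len_eq] at * <;> omega
    · simpa [PySem.List.pyGetD_natCast, List.getD_eq_getElem?_getD, hk] using hin
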